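-- pv_equiv track=rewrite | github.com/Leapense/problems | 11136번: The Diligent Cryptographer/solution.py | can_be_old_system
-- ===== SOURCE A (Python) =====
-- ALPHABET_START = ord('A')
--
-- def can_be_old_system(key: str) -> bool:
--     length = len(key)
--     max_char_code = max(ord(ch) for ch in key)
--     min_m_required = max_char_code - ALPHABET_START + 1
--
--     for m in range(min_m_required, 27):
--         if length < m:
--             if len(set(key)) < length:
--                 continue
--         else:
--             first_block = key[:m]
--             if len(set(first_block)) < m:
--                 continue
--
--         if length > m:
--             mismatch_found = False
--             for i in range(m, length):
--                 if key[i] != key[i - m]: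
--                     mismatch_found = True
--                     break
--             if mismatch_found:
--                 continue
--
--         return True
--     return False
-- ===== SOURCE B (Python) =====
-- ALPHABET_START = ord('A')
--
-- def can_be_old_system(key: str) -> bool:
--     n = len(key)
--     min_m_required = max(ord(ch) for ch in key) - ALPHABET_START + 1
--     # longest all-distinct prefix of key
--     seen = set()
--     distinct_prefix = 0
--     for ch in key:
--         if ch in seen:
--             break
--         seen.add(ch)
--         distinct_prefix += 1
--     for m in range(max(min_m_required, 0), 27):
--         if min(m, n) <= distinct_prefix and (m >= n or key[m:] == key[:n - m]):
--             return True
--     return False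
-- ===== Notes on version B (the rewrite author's own statement) =====
-- stated objective: alternative
-- what changed: B precomputes the longest all-distinct prefix once and tests each candidate block size m by a single slice comparison key[m:] == key[:n-m], replacing A's per-m set construction and per-m index-by-index mismatch loop; the loop starts at max(min_m,0), avoiding A's negative-index arithmetic.
import Mathlib
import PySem

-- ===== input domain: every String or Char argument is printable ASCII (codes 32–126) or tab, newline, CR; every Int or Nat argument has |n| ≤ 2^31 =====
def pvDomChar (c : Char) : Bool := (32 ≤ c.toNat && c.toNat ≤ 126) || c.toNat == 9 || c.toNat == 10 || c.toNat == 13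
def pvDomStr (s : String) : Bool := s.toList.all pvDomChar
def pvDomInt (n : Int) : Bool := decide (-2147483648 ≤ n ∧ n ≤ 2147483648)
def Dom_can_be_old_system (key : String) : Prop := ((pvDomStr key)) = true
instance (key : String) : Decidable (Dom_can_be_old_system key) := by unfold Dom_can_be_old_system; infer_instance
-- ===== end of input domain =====

-- B replaces A's per-m set building and index-by-index mismatch scan by one precomputed
-- longest-all-distinct-prefix length and a slice comparison per candidate m (objective: alternative).

-- ===== PORT A =====
-- inner "for i in range(m, length)" mismatch scan; a 'none' from pyGet? is Python's IndexError (outside Pre_)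
def pvAInner (l : List Char) (m : Int) : List Int → Bool
  | [] => false
  | i :: rest =>
    match PySem.List.pyGet? l i, PySem.List.pyGet? l (i - m) with
    | some a, some b => if a ≠ b then true else pvAInner l m rest
    | _, _ => false

-- outer "for m in range(min_m_required, 27)" loop of A
def pvALoop (l : List Char) (length : Int) : List Int → Bool
  | [] => false
  | m :: ms =>
    let skip : Bool :=
      if length < m then
        decide (((PySem.Set.ofList l).length : Int) < length)
      else
        decide (((PySem.Set.ofList (PySem.List.slice l none (some m))).length : Int) < m)
    if skip then pvALoop l length ms
    else if length > m then
      if pvAInner l m (PySem.List.pyRange m length 1) then pvALoop l length ms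
      else true
    else true

def can_be_old_system (key : String) : Bool :=
  let l := key.toList
  let length : Int := l.length
  match PySem.List.max? (l.map (fun ch => (ch.toNat : Int))) (fun y => y) with
  | none => false        -- Python: max() raises ValueError on the empty key (outside Pre_)
  | some maxCharCode =>
    let minMRequired := maxCharCode - 65 + 1
    pvALoop l length (PySem.List.pyRange minMRequired 27 1)

-- ===== PORT B =====
-- B's first loop: length of the longest all-distinct prefix (break on first repeat), with its seen-set
def pvDistinctPrefix (seen : PySem.Set Char) : List Char → Int
  | [] => 0
  | ch :: rest =>
    if PySem.Set.contains seen ch then 0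
    else 1 + pvDistinctPrefix (PySem.Set.add seen ch) rest

-- B's second loop: "for m in range(max(min_m_required, 0), 27)"
def pvBLoop (l : List Char) (n dp : Int) : List Int → Bool
  | [] => false
  | m :: ms =>
    if min m n ≤ dp ∧
       (m ≥ n ∨ PySem.List.slice l (some m) none = PySem.List.slice l none (some (n - m)))
    then true
    else pvBLoop l n dp ms

def can_be_old_system_alt (key : String) : Bool :=
  let l := key.toList
  let n : Int := l.length
  match PySem.List.max? (l.map (fun ch => (ch.toNat : Int))) (fun y => y) with
  | none => false        -- max() raises ValueError on the empty key in B too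
  | some maxCharCode =>
    let minMRequired := maxCharCode - 65 + 1
    pvBLoop l n (pvDistinctPrefix PySem.Set.empty l) (PySem.List.pyRange (max minMRequired 0) 27 1)

-- ===== PRECONDITION & SPEC =====
def pvMaxCode (l : List Char) : Nat := l.foldl (fun a ch => max a ch.toNat) 0

-- Pre_ excludes exactly the inputs where A raises: the empty key (ValueError from max()) and keys
-- whose character codes are all below 65 and that coincide with their own rotation by some
-- p ≤ 64 - max code (A's negative-m scan then indexes past the end: IndexError).
def Pre_can_be_old_system (key : String) : Prop :=
  key.toList ≠ [] ∧
  ∀ p ∈ Finset.Icc 1 (64 - pvMaxCode key.toList),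
    key.toList.drop p ++ key.toList.take p ≠ key.toList

instance (key : String) : Decidable (Pre_can_be_old_system key) := by
  unfold Pre_can_be_old_system; infer_instance

def pvWitness_can_be_old_system : String := "AB"

def Spec_can_be_old_system (key : String) (out : Bool) : Prop := out = can_be_old_system_alt key
instance (key : String) (out : Bool) : Decidable (Spec_can_be_old_system key out) := by unfold Spec_can_be_old_system; infer_instance

-- ===== CLAIM (what is proved, stated in full; the proofs are below) =====
def Claim_equal_can_be_old_system : Prop := ∀ (key : String), Dom_can_be_old_system key → Pre_can_be_old_system key → Spec_can_be_old_system key (can_be_old_system key)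

-- ===== LEMMAS AND PROOFS =====

lemma pvSet_add_of_mem {s : PySem.Set Char} {x : Char} (hx : x ∈ s) :
    PySem.Set.add s x = s := by
  simp only [PySem.Set.add]
  rw [(PySem.Set.contains_iff s x).mpr hx]
  simp

lemma pvSet_add_of_not_mem {s : PySem.Set Char} {x : Char} (hx : x ∉ s) :
    PySem.Set.add s x = s ++ [x] := by
  have hc : PySem.Set.contains s x = false := by
    cases hcc : PySem.Set.contains s x
    · rfl
    · exact absurd ((PySem.Set.contains_iff s x).mp hcc) hx
  simp only [PySem.Set.add]
  rw [hc]
  simp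

lemma pvSet_foldl_add_len : ∀ (xs : List Char) (s : PySem.Set Char),
    (xs.foldl PySem.Set.add s).length ≤ s.length + xs.length ∧
    ((xs.foldl PySem.Set.add s).length = s.length + xs.length ↔ (xs.Nodup ∧ ∀ x ∈ xs, x ∉ s)) := by
  intro xs
  induction xs with
  | nil => intro s; simp
  | cons x xs ih =>
    intro s
    simp only [List.foldl_cons, List.length_cons]
    by_cases hx : x ∈ s
    · rw [pvSet_add_of_mem hx]
      have h := ih s
      constructor
      · omega
      · constructor
        · intro h2; omega
        · rintro ⟨-, h2⟩; exact absurd hx (h2 x (by simp))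
    · rw [pvSet_add_of_not_mem hx]
      have h := ih (s ++ [x])
      simp only [List.length_append, List.length_cons, List.length_nil] at h
      constructor
      · omega
      · rw [show s.length + (xs.length + 1) = s.length + 1 + xs.length by omega]
        rw [h.2]
        simp only [List.nodup_cons, List.mem_append, List.mem_singleton]
        constructor
        · rintro ⟨hnd, hmem⟩
          refine ⟨⟨fun hxxs => (hmem x hxxs) (Or.inr rfl), hnd⟩, fun y hy => ?_⟩
          rcases List.mem_cons.mp hy with hy | hy
          · subst hy; exact hx
          · intro hys; exact (hmem y hy) (Or.inl hys)
        · rintro ⟨⟨hxxs, hnd⟩, hmem⟩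
          refine ⟨hnd, fun y hy hmem2 => ?_⟩
          rcases hmem2 with hys | hyx
          · exact (hmem y (List.mem_cons_of_mem x hy)) hys
          · exact hxxs (hyx ▸ hy)

lemma pvSetLen_lt (xs : List Char) :
    ((((PySem.Set.ofList xs).length : Int) < (xs.length : Int)) ↔ ¬ xs.Nodup) := by
  have hof : PySem.Set.ofList xs = xs.foldl PySem.Set.add ([] : PySem.Set Char) := rfl
  have h := pvSet_foldl_add_len xs ([] : PySem.Set Char)
  simp only [List.length_nil, Nat.zero_add] at h
  rw [hof]
  constructor
  · intro hlt hnd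
    have : (xs.foldl PySem.Set.add ([] : PySem.Set Char)).length = xs.length :=
      h.2.2 ⟨hnd, by simp⟩
    omega
  · intro hnd
    have hne : (xs.foldl PySem.Set.add ([] : PySem.Set Char)).length ≠ xs.length := by
      intro heq
      exact hnd (h.2.1 heq).1
    have hle := h.1
    omega

lemma pvDP_bounds : ∀ (l : List Char) (seen : PySem.Set Char),
    0 ≤ pvDistinctPrefix seen l ∧ pvDistinctPrefix seen l ≤ (l.length : Int) := by
  intro l
  induction l with
  | nil => intro seen; simp [pvDistinctPrefix]
  | cons c cs ih =>
    intro seen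
    simp only [pvDistinctPrefix]
    split
    · simp only [List.length_cons]
      push_cast
      exact ⟨trivial, by omega⟩
    · have := ih (PySem.Set.add seen c)
      simp only [List.length_cons]
      push_cast
      omega

lemma pvDP_iff : ∀ (l : List Char) (seen : PySem.Set Char) (m : ℕ), m ≤ l.length →
    (((m : Int) ≤ pvDistinctPrefix seen l) ↔ ((l.take m).Nodup ∧ ∀ c ∈ l.take m, c ∉ seen)) := by
  intro l
  induction l with
  | nil =>
    intro seen m hm
    simp only [List.length_nil, Nat.le_zero] at hm
    subst hm
    simp [pvDistinctPrefix]
  | cons ch rest ih =>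
    intro seen m hm
    cases m with
    | zero => simpa using (pvDP_bounds (ch :: rest) seen).1
    | succ k =>
      simp only [List.length_cons, Nat.succ_le_succ_iff] at hm
      simp only [pvDistinctPrefix]
      by_cases hc : ch ∈ seen
      · rw [(PySem.Set.contains_iff seen ch).mpr hc]
        simp only [if_true]
        constructor
        · intro h
          exfalso
          have : ((k + 1 : ℕ) : Int) ≥ 1 := by push_cast; omega
          omega
        · rintro ⟨-, h2⟩
          exact absurd hc (h2 ch (by simp [List.take_succ_cons]))
      · have hcf : PySem.Set.contains seen ch = false := by
          cases hcc : PySem.Set.contains seen ch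
          · rfl
          · exact absurd ((PySem.Set.contains_iff seen ch).mp hcc) hc
        rw [hcf]
        simp only [Bool.false_eq_true, if_false]
        have hiff := ih (PySem.Set.add seen ch) k hm
        have hcast : (((k + 1 : ℕ) : Int) ≤ 1 + pvDistinctPrefix (PySem.Set.add seen ch) rest) ↔
            (((k : ℕ) : Int) ≤ pvDistinctPrefix (PySem.Set.add seen ch) rest) := by
          push_cast; omega
        rw [hcast, hiff]
        simp only [List.take_succ_cons, List.nodup_cons]
        constructor
        · rintro ⟨hnd, hmem⟩
          refine ⟨⟨fun hin => ?_, hnd⟩, fun c hcm => ?_⟩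
          · exact (hmem ch hin) ((PySem.Set.mem_add seen ch ch).mpr (Or.inr rfl))
          · rcases List.mem_cons.mp hcm with hcm | hcm
            · subst hcm; exact hc
            · intro hcs
              exact (hmem c hcm) ((PySem.Set.mem_add seen ch c).mpr (Or.inl hcs))
        · rintro ⟨⟨hnin, hnd⟩, hmem⟩
          refine ⟨hnd, fun c hcm hmem2 => ?_⟩
          rcases (PySem.Set.mem_add seen ch c).mp hmem2 with hcs | hce
          · exact (hmem c (List.mem_cons_of_mem ch hcm)) hcs
          · exact hnin (hce ▸ hcm)

-- distinct-prefix with the empty seen-set: m ≤ D  ↔  the first m characters are pairwise distinct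
lemma pvDP_empty_iff (l : List Char) (m : ℕ) (hm : m ≤ l.length) :
    ((m : Int) ≤ pvDistinctPrefix PySem.Set.empty l) ↔ (l.take m).Nodup := by
  rw [pvDP_iff l PySem.Set.empty m hm]
  simp [PySem.Set.empty]

-- A's inner scan over in-range indices returns false iff every compared pair agrees
lemma pvAInner_false_iff (l : List Char) (m : Int) :
    ∀ is : List Int,
      (∀ i ∈ is, PySem.Raise.InRange l.length i ∧ PySem.Raise.InRange l.length (i - m)) →
      (pvAInner l m is = false ↔
        ∀ i ∈ is, PySem.List.pyGet? l i = PySem.List.pyGet? l (i - m)) := by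
  intro is
  induction is with
  | nil => intro _; simp [pvAInner]
  | cons i rest ih =>
    intro h
    have hi := h i (by simp)
    obtain ⟨a, ha⟩ : ∃ a, PySem.List.pyGet? l i = some a := by
      cases heq : PySem.List.pyGet? l i with
      | none => exact absurd hi.1 ((PySem.List.pyGet?_eq_none_iff l i).mp heq)
      | some a => exact ⟨a, rfl⟩
    obtain ⟨b, hb⟩ : ∃ b, PySem.List.pyGet? l (i - m) = some b := by
      cases heq : PySem.List.pyGet? l (i - m) with
      | none => exact absurd hi.2 ((PySem.List.pyGet?_eq_none_iff l (i - m)).mp heq)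
      | some b => exact ⟨b, rfl⟩
    have ihr := ih (fun j hj => h j (List.mem_cons_of_mem i hj))
    simp only [pvAInner, ha, hb]
    by_cases hab : a = b
    · subst hab
      simp only [ne_eq, not_true_eq_false, if_false, ihr]
      constructor
      · intro hr j hj
        rcases List.mem_cons.mp hj with hj | hj
        · subst hj; rw [ha, hb]
        · exact hr j hj
      · intro hr j hj
        exact hr j (List.mem_cons_of_mem i hj)
    · simp only [ne_eq, hab, not_false_eq_true, if_true]
      constructor
      · intro hfalse; exact absurd hfalse (by simp)
      · intro hall
        exfalso
        have := hall i (by simp)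
        rw [ha, hb] at this
        exact hab (Option.some.inj this)

lemma pvAInner_append_true (l : List Char) (m : Int) :
    ∀ (is ys : List Int), pvAInner l m is = true → pvAInner l m (is ++ ys) = true := by
  intro is
  induction is with
  | nil => intro ys h; simp [pvAInner] at h
  | cons i rest ih =>
    intro ys h
    rw [List.cons_append]
    cases h1 : PySem.List.pyGet? l i with
    | none =>
      simp only [pvAInner, h1] at h
      exact absurd h (by decide)
    | some a =>
      cases h2 : PySem.List.pyGet? l (i - m) with
      | none =>
        simp only [pvAInner, h1, h2] at h
        exact absurd h (by decide)
      | some b =>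
        simp only [pvAInner, h1, h2] at h ⊢
        by_cases hab : a = b
        · subst hab
          simp only [ne_eq, not_true_eq_false, if_false] at h ⊢
          exact ih ys h
        · simp [hab]

-- the positive window: all equal  ↔  key[m:] == key[:n-m]
lemma pvWindow_pos_iff (l : List Char) (m : ℕ) (h1 : 1 ≤ m) (h2 : m < l.length) :
    (∀ i ∈ PySem.List.pyRange (m : Int) (l.length : Int) 1,
        PySem.List.pyGet? l i = PySem.List.pyGet? l (i - (m : Int))) ↔
      l.drop m = l.take (l.length - m) := by
  constructor
  · intro h
    apply List.ext_getElem
    · simp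
    · intro k hk1 hk2
      simp only [List.length_drop] at hk1
      have hmem : ((m + k : ℕ) : Int) ∈ PySem.List.pyRange (m : Int) (l.length : Int) 1 := by
        rw [PySem.List.mem_pyRange_one]; push_cast; omega
      have hh := h _ hmem
      rw [PySem.List.pyGet?_of_nonneg l (by positivity)] at hh
      rw [show ((m + k : ℕ) : Int) - (m : Int) = ((k : ℕ) : Int) by push_cast; omega] at hh
      rw [PySem.List.pyGet?_of_nonneg l (by positivity)] at hh
      simp only [Int.toNat_natCast] at hh
      rw [List.getElem?_eq_getElem (by omega : m + k < l.length)] at hh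
      rw [List.getElem?_eq_getElem (by omega : k < l.length)] at hh
      simp only [List.getElem_drop, List.getElem_take]
      exact Option.some.inj hh
  · intro h i hi
    rw [PySem.List.mem_pyRange_one] at hi
    have h0 : (0 : Int) ≤ i := by omega
    have h0m : (0 : Int) ≤ i - (m : Int) := by omega
    rw [PySem.List.pyGet?_of_nonneg l h0, PySem.List.pyGet?_of_nonneg l h0m]
    have hj : i.toNat < l.length := by omega
    have hjm : (i - (m : Int)).toNat = i.toNat - m := by omega
    have hjk : i.toNat - m < l.length - m := by omega
    have hgm : m ≤ i.toNat := by omega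
    have hget : l[i.toNat]'hj = l[i.toNat - m]'(by omega) := by
      have e1 : (l.drop m)[i.toNat - m]'(by simp [List.length_drop]; omega) =
          (l.take (l.length - m))[i.toNat - m]'(by simp [List.length_take]; omega) := by
        congr 1
      rw [List.getElem_drop, List.getElem_take] at e1
      simp only [show m + (i.toNat - m) = i.toNat from by omega] at e1
      exact e1
    rw [hjm]
    rw [List.getElem?_eq_getElem hj, List.getElem?_eq_getElem (by omega : i.toNat - m < l.length)]
    exact congrArg some hget

-- the negative window (m = -p): all equal  ↔  the key equals its own rotation by p
lemma pvWindow_neg_iff (l : List Char) (p : ℕ) (h1 : 1 ≤ p) (h2 : p < l.length) :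
    (∀ i ∈ PySem.List.pyRange (-(p : Int)) ((l.length : Int) - (p : Int)) 1,
        PySem.List.pyGet? l i = PySem.List.pyGet? l (i + (p : Int))) ↔
      l.drop p ++ l.take p = l := by
  constructor
  · intro h
    apply List.ext_getElem
    · simp; omega
    · intro j hj1 hj2
      simp only [List.length_append, List.length_drop, List.length_take] at hj1
      by_cases hcase : j < l.length - p
      · have hmem : ((j : ℕ) : Int) ∈
            PySem.List.pyRange (-(p : Int)) ((l.length : Int) - (p : Int)) 1 := by
          rw [PySem.List.mem_pyRange_one]; omega
        have hh := h _ hmem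
        rw [PySem.List.pyGet?_of_nonneg l (by positivity)] at hh
        rw [show ((j : ℕ) : Int) + (p : Int) = ((j + p : ℕ) : Int) by push_cast; omega] at hh
        rw [PySem.List.pyGet?_of_nonneg l (by positivity)] at hh
        simp only [Int.toNat_natCast] at hh
        rw [List.getElem?_eq_getElem (by omega : j < l.length),
            List.getElem?_eq_getElem (by omega : j + p < l.length)] at hh
        rw [List.getElem_append_left (by simp [List.length_drop]; omega)]
        rw [List.getElem_drop]
        simp only [show p + j = j + p from by omega]
        exact (Option.some.inj hh).symm
      · have hk : 0 < l.length - j ∧ l.length - j ≤ p := by omega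
        have hmem : ((j : Int) - (l.length : Int)) ∈
            PySem.List.pyRange (-(p : Int)) ((l.length : Int) - (p : Int)) 1 := by
          rw [PySem.List.mem_pyRange_one]; omega
        have hh := h _ hmem
        rw [show (j : Int) - (l.length : Int) = -(((l.length - j : ℕ) : Int)) by omega] at hh
        rw [PySem.List.pyGet?_neg_natCast l (l.length - j) hk.1 (by omega)] at hh
        rw [show -(((l.length - j : ℕ) : Int)) + (p : Int) = ((j - (l.length - p) : ℕ) : Int) by
          omega] at hh
        rw [PySem.List.pyGet?_of_nonneg l (by positivity)] at hh
        simp only [Int.toNat_natCast] at hh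
        rw [show l.length - (l.length - j) = j by omega] at hh
        rw [List.getElem?_eq_getElem (by omega : j < l.length),
            List.getElem?_eq_getElem (by omega : j - (l.length - p) < l.length)] at hh
        rw [List.getElem_append_right (by simp [List.length_drop]; omega)]
        simp only [List.length_drop]
        rw [List.getElem_take]
        exact (Option.some.inj hh).symm
  · intro h i hi
    rw [PySem.List.mem_pyRange_one] at hi
    have key : ∀ (j : ℕ) (hjl : j < l.length),
        l[j]'hjl = (l.drop p ++ l.take p)[j]'(by simp; omega) := by
      intro j hjl
      congr 1
      exact h.symm
    by_cases h0 : 0 ≤ i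
    · have hjl : i.toNat < l.length := by omega
      have hh := key i.toNat hjl
      rw [List.getElem_append_left (by simp [List.length_drop]; omega)] at hh
      rw [List.getElem_drop] at hh
      rw [PySem.List.pyGet?_of_nonneg l h0]
      rw [show i + (p : Int) = ((p + i.toNat : ℕ) : Int) by omega]
      rw [PySem.List.pyGet?_of_nonneg l (by positivity)]
      simp only [Int.toNat_natCast]
      rw [List.getElem?_eq_getElem hjl,
          List.getElem?_eq_getElem (by omega : p + i.toNat < l.length)]
      exact congrArg some hh
    · have hk : 0 < (-i).toNat ∧ (-i).toNat ≤ l.length := by omega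
      have hj : l.length - (-i).toNat < l.length := by omega
      have hh := key (l.length - (-i).toNat) hj
      rw [List.getElem_append_right (by simp [List.length_drop]; omega)] at hh
      simp only [List.length_drop] at hh
      rw [List.getElem_take] at hh
      rw [show i = -(((-i).toNat : ℕ) : Int) by omega]
      rw [PySem.List.pyGet?_neg_natCast l (-i).toNat hk.1 hk.2]
      rw [show -(((-i).toNat : ℕ) : Int) + (p : Int) =
          ((l.length - (-i).toNat - (l.length - p) : ℕ) : Int) by omega]
      rw [PySem.List.pyGet?_of_nonneg l (by positivity)]
      simp only [Int.toNat_natCast]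
      rw [List.getElem?_eq_getElem hj,
          List.getElem?_eq_getElem (by omega : l.length - (-i).toNat - (l.length - p) < l.length)]
      exact congrArg some hh

-- max(ord(ch) for ch in key) equals the foldl maximum pvMaxCode
lemma pvFoldlMax_cast : ∀ (cs : List Char) (a : ℕ),
    (cs.map (fun ch => (ch.toNat : Int))).foldl max ((a : ℕ) : Int) =
      ((cs.foldl (fun acc ch => max acc ch.toNat) a : ℕ) : Int) := by
  intro cs
  induction cs with
  | nil => intro a; simp
  | cons c cs ih =>
    intro a
    simp only [List.map_cons, List.foldl_cons]
    rw [show max ((a : ℕ) : Int) ((c.toNat : ℕ) : Int) = ((max a c.toNat : ℕ) : Int) by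
      push_cast; omega]
    exact ih _

lemma pvMax_eq (l : List Char) (hl : l ≠ []) :
    PySem.List.max? (l.map (fun ch => (ch.toNat : Int))) (fun y => y) =
      some ((pvMaxCode l : Int)) := by
  cases l with
  | nil => exact absurd rfl hl
  | cons c cs =>
    rw [List.map_cons, PySem.List.max?_id_cons]
    rw [pvFoldlMax_cast cs c.toNat]
    have : pvMaxCode (c :: cs) = cs.foldl (fun acc ch => max acc ch.toNat) c.toNat := by
      simp [pvMaxCode]
    rw [this]

-- proof-only helpers: one step of each loop
def pvAStep (l : List Char) (n m : Int) : Bool :=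
  if (if n < m then decide (((PySem.Set.ofList l).length : Int) < n)
      else decide (((PySem.Set.ofList (PySem.List.slice l none (some m))).length : Int) < m))
  then false
  else if n > m then !(pvAInner l m (PySem.List.pyRange m n 1)) else true

abbrev pvBCond (l : List Char) (n dp m : Int) : Prop :=
  min m n ≤ dp ∧
    (m ≥ n ∨ PySem.List.slice l (some m) none = PySem.List.slice l none (some (n - m)))

lemma pvALoop_cons (l : List Char) (n m : Int) (ms : List Int) :
    pvALoop l n (m :: ms) = (pvAStep l n m || pvALoop l n ms) := by
  by_cases h1 : n < m
  · by_cases h2 : ((PySem.Set.ofList l).length : Int) < n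
    · simp [pvALoop, pvAStep, h1, h2]
    · simp [pvALoop, pvAStep, h1, h2, show ¬ n > m by omega]
  · by_cases h2 : ((PySem.Set.ofList (PySem.List.slice l none (some m))).length : Int) < m
    · simp [pvALoop, pvAStep, h1, h2]
    · by_cases h3 : n > m
      · cases hmis : pvAInner l m (PySem.List.pyRange m n 1) <;>
          simp [pvALoop, pvAStep, h1, h2, h3, hmis]
      · simp [pvALoop, pvAStep, h1, h2, h3]

lemma pvBLoop_cons (l : List Char) (n dp m : Int) (ms : List Int) :
    pvBLoop l n dp (m :: ms) = (decide (pvBCond l n dp m) || pvBLoop l n dp ms) := by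
  simp only [pvBLoop]
  split
  · rename_i hc
    rw [decide_eq_true hc]
    simp
  · rename_i hc
    rw [decide_eq_false hc]
    simp

-- A's outer loop distributes over ++ (false at [] means "all m rejected, keep going")
lemma pvALoop_append (l : List Char) (n : Int) :
    ∀ xs ys : List Int, pvALoop l n (xs ++ ys) = (pvALoop l n xs || pvALoop l n ys) := by
  intro xs
  induction xs with
  | nil => intro ys; simp [pvALoop]
  | cons m ms ih =>
    intro ys
    rw [List.cons_append, pvALoop_cons, pvALoop_cons, ih, Bool.or_assoc]

-- one step of A's loop, for a candidate m ≥ 1, equals B's test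
lemma pvStep_pos (l : List Char) (hl : l ≠ []) (m : Int) (hm : 1 ≤ m) :
    pvAStep l (l.length : Int) m =
      decide (pvBCond l (l.length : Int) (pvDistinctPrefix PySem.Set.empty l) m) := by
  have hn1 : 1 ≤ l.length := List.length_pos_iff.mpr hl
  have hdp := pvDP_bounds l PySem.Set.empty
  have hNd : ((l.length : Int) ≤ pvDistinctPrefix PySem.Set.empty l ↔ l.Nodup) := by
    have := pvDP_empty_iff l l.length (le_refl _)
    rwa [List.take_length] at this
  rcases lt_trichotomy (l.length : Int) m with hc | hc | hc
  · -- length < m : the whole-key distinctness test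
    simp only [pvAStep, if_pos hc]
    have hmin : min m (l.length : Int) = (l.length : Int) := by omega
    by_cases hnd : l.Nodup
    · have hskip : ¬ (((PySem.Set.ofList l).length : Int) < (l.length : Int)) := by
        rw [pvSetLen_lt]; exact fun h => h hnd
      rw [decide_eq_false hskip]
      simp only [Bool.false_eq_true, if_false]
      rw [if_neg (by omega : ¬ (l.length : Int) > m)]
      rw [decide_eq_true (show pvBCond _ _ _ _ from
        ⟨by rw [hmin]; exact hNd.mpr hnd, Or.inl (by omega)⟩)]
    · have hskip : (((PySem.Set.ofList l).length : Int) < (l.length : Int)) := by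
        rw [pvSetLen_lt]; exact hnd
      rw [decide_eq_true hskip]
      simp only [if_true]
      symm
      rw [decide_eq_false]
      intro hcond
      apply hnd
      apply hNd.mp
      have := hcond.1
      rwa [hmin] at this
  · -- length = m : the first block is the whole key
    simp only [pvAStep, if_neg (by omega : ¬ (l.length : Int) < m)]
    have hsl : PySem.List.slice l none (some m) = l := by
      rw [PySem.List.slice_to l (by omega)]
      rw [show m.toNat = l.length by omega, List.take_length]
    rw [hsl]
    have hmin : min m (l.length : Int) = (l.length : Int) := by omega
    have hset := pvSetLen_lt l
    rw [show ((l.length : ℕ) : Int) = m by omega] at hset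
    by_cases hnd : l.Nodup
    · rw [decide_eq_false (by rw [hset]; exact fun h => h hnd)]
      simp only [Bool.false_eq_true, if_false]
      rw [if_neg (by omega : ¬ (l.length : Int) > m)]
      rw [decide_eq_true (show pvBCond _ _ _ _ from
        ⟨by rw [hmin]; exact hNd.mpr hnd, Or.inl (by omega)⟩)]
    · rw [decide_eq_true (by rw [hset]; exact hnd)]
      simp only [if_true]
      symm
      rw [decide_eq_false]
      intro hcond
      apply hnd
      apply hNd.mp
      have := hcond.1
      rwa [hmin] at this
  · -- m < length : first-block distinctness plus the periodicity scan
    have hmn : m.toNat < l.length := by omega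
    have hmin : min m (l.length : Int) = m := by omega
    have hfb : PySem.List.slice l none (some m) = l.take m.toNat :=
      PySem.List.slice_to l (by omega)
    have hfblen : (l.take m.toNat).length = m.toNat := by
      rw [List.length_take]; omega
    have hDiff := pvDP_empty_iff l m.toNat (by omega)
    rw [show ((m.toNat : ℕ) : Int) = m by omega] at hDiff
    have hset := pvSetLen_lt (l.take m.toNat)
    rw [hfblen, show ((m.toNat : ℕ) : Int) = m by omega] at hset
    simp only [pvAStep, if_neg (by omega : ¬ (l.length : Int) < m), hfb]
    have hsl1 : PySem.List.slice l (some m) none = l.drop m.toNat :=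
      PySem.List.slice_from l (by omega)
    have hsl2 : PySem.List.slice l none (some ((l.length : Int) - m)) =
        l.take (l.length - m.toNat) := by
      rw [PySem.List.slice_to l (by omega)]
      congr 1
      omega
    by_cases hnd : (l.take m.toNat).Nodup
    · rw [decide_eq_false (by rw [hset]; exact fun h => h hnd)]
      simp only [Bool.false_eq_true, if_false]
      rw [if_pos (by omega : (l.length : Int) > m)]
      have hrange : ∀ i ∈ PySem.List.pyRange m (l.length : Int) 1,
          PySem.Raise.InRange l.length i ∧ PySem.Raise.InRange l.length (i - m) := by
        intro i hi
        rw [PySem.List.mem_pyRange_one] at hi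
        constructor <;> · rw [PySem.Raise.InRange]; omega
      have hiff := pvAInner_false_iff l m (PySem.List.pyRange m (l.length : Int) 1) hrange
      have hwin := pvWindow_pos_iff l m.toNat (by omega) hmn
      rw [show ((m.toNat : ℕ) : Int) = m by omega] at hwin
      by_cases hag : l.drop m.toNat = l.take (l.length - m.toNat)
      · rw [show pvAInner l m (PySem.List.pyRange m (l.length : Int) 1) = false by
          rw [hiff]; exact hwin.mpr hag]
        rw [decide_eq_true (show pvBCond _ _ _ _ from
          ⟨by rw [hmin]; exact hDiff.mpr hnd, Or.inr (by rw [hsl1, hsl2, hag])⟩)]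
        rfl
      · rw [show pvAInner l m (PySem.List.pyRange m (l.length : Int) 1) = true by
          rw [← Bool.not_eq_false, hiff]
          intro hall
          exact hag (hwin.mp hall)]
        symm
        rw [decide_eq_false]
        · rfl
        · intro hcond
          rcases hcond.2 with hge | heqs
          · omega
          · rw [hsl1, hsl2] at heqs
            exact hag heqs
    · rw [decide_eq_true (by rw [hset]; exact hnd)]
      simp only [if_true]
      symm
      rw [decide_eq_false]
      intro hcond
      apply hnd
      apply hDiff.mp
      have := hcond.1
      rwa [hmin] at this

-- over candidates m ≥ 1 the two loops agree
lemma pvLoop_pos (l : List Char) (hl : l ≠ []) :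
    ∀ ms : List Int, (∀ m ∈ ms, 1 ≤ m) →
      pvALoop l (l.length : Int) ms =
        pvBLoop l (l.length : Int) (pvDistinctPrefix PySem.Set.empty l) ms := by
  intro ms
  induction ms with
  | nil => intro _; simp [pvALoop, pvBLoop]
  | cons m ms ih =>
    intro h
    rw [pvALoop_cons, pvBLoop_cons, pvStep_pos l hl m (h m (by simp)),
      ih (fun x hx => h x (List.mem_cons_of_mem m hx))]

-- under Pre_, every strictly negative candidate is rejected by a mismatch in A's scan
lemma pvAStep_neg (l : List Char) (hl : l ≠ [])
    (hP : ∀ p ∈ Finset.Icc 1 (64 - pvMaxCode l), l.drop p ++ l.take p ≠ l)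
    (hPn : 64 - pvMaxCode l < l.length) (m : Int)
    (hm : -(((64 - pvMaxCode l : ℕ) : Int)) ≤ m ∧ m < 0) :
    pvAStep l (l.length : Int) m = false := by
  have hn1 : 1 ≤ l.length := List.length_pos_iff.mpr hl
  have hp1 : 1 ≤ (-m).toNat := by omega
  have hple : (-m).toNat ≤ 64 - pvMaxCode l := by omega
  have hpn : (-m).toNat < l.length := by omega
  simp only [pvAStep, if_neg (by omega : ¬ (l.length : Int) < m)]
  have hskip : ¬ (((PySem.Set.ofList (PySem.List.slice l none (some m))).length : Int) < m) := by
    have h0 : (0 : Int) ≤ ((PySem.Set.ofList (PySem.List.slice l none (some m))).length : Int) := by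
      positivity
    omega
  rw [decide_eq_false hskip]
  simp only [Bool.false_eq_true, if_false]
  rw [if_pos (by omega : (l.length : Int) > m)]
  -- the scan finds a mismatch inside the in-range window [m, length+m)
  have hmis : pvAInner l m (PySem.List.pyRange m (l.length : Int) 1) = true := by
    rw [PySem.List.pyRange_one_append m ((l.length : Int) + m) (l.length : Int)
      (by omega) (by omega)]
    apply pvAInner_append_true
    have hrange : ∀ i ∈ PySem.List.pyRange m ((l.length : Int) + m) 1,
        PySem.Raise.InRange l.length i ∧ PySem.Raise.InRange l.length (i - m) := by
      intro i hi
      rw [PySem.List.mem_pyRange_one] at hi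
      constructor <;> · rw [PySem.Raise.InRange]; omega
    have hiff := pvAInner_false_iff l m _ hrange
    have hwin := pvWindow_neg_iff l (-m).toNat hp1 hpn
    rw [show -(((-m).toNat : ℕ) : Int) = m by omega] at hwin
    rw [show (l.length : Int) - (((-m).toNat : ℕ) : Int) = (l.length : Int) + m by omega] at hwin
    cases hval : pvAInner l m (PySem.List.pyRange m ((l.length : Int) + m) 1) with
    | true => rfl
    | false =>
      exfalso
      have hall := hiff.mp hval
      apply hP (-m).toNat (Finset.mem_Icc.mpr ⟨hp1, hple⟩)
      apply hwin.mp
      intro i hi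
      have := hall i hi
      rwa [show i - m = i + (((-m).toNat : ℕ) : Int) by omega] at this
  rw [hmis]
  simp

lemma pvALoop_neg_false (l : List Char) (hl : l ≠ [])
    (hP : ∀ p ∈ Finset.Icc 1 (64 - pvMaxCode l), l.drop p ++ l.take p ≠ l)
    (hPn : 64 - pvMaxCode l < l.length) :
    ∀ ms : List Int,
      (∀ m ∈ ms, -(((64 - pvMaxCode l : ℕ) : Int)) ≤ m ∧ m < 0) →
      pvALoop l (l.length : Int) ms = false := by
  intro ms
  induction ms with
  | nil => intro _; simp [pvALoop]
  | cons m ms ih =>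
    intro h
    rw [pvALoop_cons, pvAStep_neg l hl hP hPn m (h m (by simp)),
      ih (fun x hx => h x (List.mem_cons_of_mem m hx))]
    rfl

-- at m = 0 both programs conclude True
lemma pvALoop_zero (l : List Char) (hl : l ≠ []) :
    pvALoop l (l.length : Int) (PySem.List.pyRange 0 27 1) = true := by
  have hn1 : 1 ≤ l.length := List.length_pos_iff.mpr hl
  rw [PySem.List.pyRange_one_cons (by omega : (0:Int) < 27), pvALoop_cons]
  have hstep : pvAStep l (l.length : Int) 0 = true := by
    simp only [pvAStep, if_neg (by omega : ¬ (l.length : Int) < 0)]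
    have hsl : PySem.List.slice l none (some (0 : Int)) = ([] : List Char) := by
      rw [PySem.List.slice_to l (by omega)]
      simp
    rw [hsl]
    rw [decide_eq_false (by simp [PySem.Set.ofList] :
      ¬ (((PySem.Set.ofList ([] : List Char)).length : Int) < 0))]
    simp only [Bool.false_eq_true, if_false]
    rw [if_pos (by omega : (l.length : Int) > 0)]
    have hmis : pvAInner l 0 (PySem.List.pyRange 0 (l.length : Int) 1) = false := by
      have hrange : ∀ i ∈ PySem.List.pyRange 0 (l.length : Int) 1,
          PySem.Raise.InRange l.length i ∧ PySem.Raise.InRange l.length (i - 0) := by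
        intro i hi
        rw [PySem.List.mem_pyRange_one] at hi
        constructor <;> · rw [PySem.Raise.InRange]; omega
      rw [pvAInner_false_iff l 0 _ hrange]
      intro i _
      rw [show i - 0 = i by omega]
    rw [hmis]
    rfl
  rw [hstep]
  rfl

lemma pvBLoop_zero (l : List Char) (hl : l ≠ []) (dp : Int) (hdp : 0 ≤ dp) :
    pvBLoop l (l.length : Int) dp (PySem.List.pyRange 0 27 1) = true := by
  have hn1 : 1 ≤ l.length := List.length_pos_iff.mpr hl
  rw [PySem.List.pyRange_one_cons (by omega : (0:Int) < 27), pvBLoop_cons]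
  have hcond : pvBCond l (l.length : Int) dp 0 := by
    constructor
    · rw [min_def]
      split <;> omega
    · right
      rw [PySem.List.slice_from l (by omega : (0:Int) ≤ 0)]
      rw [PySem.List.slice_to l (by omega : (0:Int) ≤ (l.length : Int) - 0)]
      rw [show ((0:Int)).toNat = 0 by omega, List.drop_zero]
      rw [show ((l.length : Int) - 0).toNat = l.length by omega, List.take_length]
  rw [decide_eq_true hcond]
  rfl

-- ===== VERDICT (by name: the statement is the Claim_ definition above) =====
theorem can_be_old_system_spec : Claim_equal_can_be_old_system := by
  intro key _ hpre
  obtain ⟨hl, hP⟩ := hpre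
  unfold Spec_can_be_old_system
  unfold can_be_old_system can_be_old_system_alt
  simp only [pvMax_eq key.toList hl]
  by_cases hcase : 65 ≤ pvMaxCode key.toList
  · -- some character code is ≥ 65: every candidate m is ≥ 1 and the loops agree pointwise
    rw [max_eq_left (by omega)]
    apply pvLoop_pos key.toList hl
    intro m hm
    rw [PySem.List.mem_pyRange_one] at hm
    have : (65 : Int) ≤ (pvMaxCode key.toList : Int) := by exact_mod_cast hcase
    omega
  · -- all character codes below 65: A rejects every negative m and both accept at m = 0
    have hM64 : pvMaxCode key.toList ≤ 64 := by omega
    have hcast : ((64 - pvMaxCode key.toList : ℕ) : Int) = 64 - (pvMaxCode key.toList : Int) := by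
      push_cast [Nat.cast_sub hM64]
      ring
    have hn1 : 1 ≤ key.toList.length := List.length_pos_iff.mpr hl
    have hPn : 64 - pvMaxCode key.toList < key.toList.length := by
      by_contra hcon
      push Not at hcon
      apply hP key.toList.length (Finset.mem_Icc.mpr ⟨hn1, hcon⟩)
      rw [List.drop_length, List.take_length, List.nil_append]
    have hminM : (pvMaxCode key.toList : Int) - 65 + 1 ≤ 0 := by
      have : (pvMaxCode key.toList : Int) ≤ 64 := by exact_mod_cast hM64
      omega
    rw [max_eq_right (by omega)]
    rw [PySem.List.pyRange_one_append ((pvMaxCode key.toList : Int) - 65 + 1) 0 27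
      (by omega) (by omega)]
    rw [pvALoop_append]
    rw [pvALoop_neg_false key.toList hl hP hPn _ ?mems]
    case mems =>
      intro m hm
      rw [PySem.List.mem_pyRange_one] at hm
      constructor
      · rw [hcast]
        omega
      · omega
    rw [pvALoop_zero key.toList hl,
      pvBLoop_zero key.toList hl _ (pvDP_bounds key.toList PySem.Set.empty).1]
    rfl
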